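-- pv_equiv track=rewrite | github.com/DrDiazHurtado/GameTheory | game_theory.py | score_game
-- ===== SOURCE A (Python) =====
-- def score_game(history1, history2):
--     # Scores the game based on the moves.
--     score = 0
--     for move1, move2 in zip(history1, history2):
--         if move1 and move2:
--             score += 1  # Mutual cooperation
--         elif move1 and not move2:
--             score += 0  # Betrayed
--         elif not move1 and move2:
--             score += 3  # Successful betrayal
--         else:
--             score += 2  # Mutual betrayal
--     return score
-- ===== SOURCE B (Python) =====
-- def score_game(history1, history2):
--     # Aggregate form: per-pair payoff is 2 - 2*bool(m1) + bool(m2).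
--     pairs = list(zip(history1, history2))
--     c1 = sum(1 for m1, _ in pairs if m1)
--     c2 = sum(1 for _, m2 in pairs if m2)
--     return 2 * len(pairs) - 2 * c1 + c2
-- ===== Notes on version B (the rewrite author's own statement) =====
-- stated objective: simpler
-- what changed: Replaces the four-way branch-and-accumulate loop with a closed per-pair payoff 2 - 2*m1 + m2, computed from two aggregate counts over the zipped pairs.
import Mathlib
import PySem

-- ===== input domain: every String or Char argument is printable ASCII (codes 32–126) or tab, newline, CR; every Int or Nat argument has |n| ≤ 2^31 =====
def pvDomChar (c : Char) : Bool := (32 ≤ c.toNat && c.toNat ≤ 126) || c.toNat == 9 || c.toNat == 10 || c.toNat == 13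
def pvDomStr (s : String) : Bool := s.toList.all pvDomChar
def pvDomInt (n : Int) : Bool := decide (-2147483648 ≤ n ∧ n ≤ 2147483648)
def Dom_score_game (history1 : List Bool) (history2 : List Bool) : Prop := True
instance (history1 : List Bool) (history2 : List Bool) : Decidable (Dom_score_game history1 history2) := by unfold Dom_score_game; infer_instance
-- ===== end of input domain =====

-- B replaces A's four-way branch-and-accumulate loop by aggregate counts combined
-- with the closed per-pair payoff 2 - 2*m1 + m2 (objective: simpler).

-- ===== PORT A =====
def score_game (history1 : List Bool) (history2 : List Bool) : Int :=
  (history1.zip history2).foldl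
    (fun score p =>
      if p.1 && p.2 then score + 1
      else if p.1 && !p.2 then score + 0
      else if !p.1 && p.2 then score + 3
      else score + 2) 0

-- ===== PORT B =====
def score_game_alt (history1 : List Bool) (history2 : List Bool) : Int :=
  let pairs := history1.zip history2
  let c1 : Int := pairs.countP (fun p => p.1)
  let c2 : Int := pairs.countP (fun p => p.2)
  2 * (pairs.length : Int) - 2 * c1 + c2

-- ===== PRECONDITION & SPEC =====
def Spec_score_game (history1 : List Bool) (history2 : List Bool) (out : Int) : Prop := out = score_game_alt history1 history2
instance (history1 : List Bool) (history2 : List Bool) (out : Int) : Decidable (Spec_score_game history1 history2 out) := by unfold Spec_score_game; infer_instance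

-- ===== CLAIM (what is proved, stated in full; the proofs are below) =====
def Claim_equal_score_game : Prop := ∀ (history1 : List Bool) (history2 : List Bool), Dom_score_game history1 history2 → Spec_score_game history1 history2 (score_game history1 history2)

-- ===== LEMMAS AND PROOFS =====
theorem score_game_foldl_eq (l : List (Bool × Bool)) (acc : Int) :
    l.foldl
      (fun score p =>
        if p.1 && p.2 then score + 1
        else if p.1 && !p.2 then score + 0
        else if !p.1 && p.2 then score + 3
        else score + 2) acc
      = acc + 2 * (l.length : Int) - 2 * (l.countP (fun p => p.1) : Int)
          + (l.countP (fun p => p.2) : Int) := by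
  induction l generalizing acc with
  | nil => simp
  | cons p t ih =>
    obtain ⟨m1, m2⟩ := p
    rw [List.foldl_cons, ih]
    cases m1 <;> cases m2 <;> simp [List.countP_cons] <;> push_cast <;> ring

-- ===== VERDICT (by name: the statement is the Claim_ definition above) =====
theorem score_game_spec : Claim_equal_score_game := by
  intro h1 h2 _
  unfold Spec_score_game score_game score_game_alt
  simp only [score_game_foldl_eq]
  ring
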